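-- pv_equiv track=rewrite | github.com/rudranaik/RAGaaS | loader.py | _normalize_newlines
-- ===== SOURCE A (Python) =====
-- from typing import Iterable, List, Optional, Dict
--
-- def _normalize_newlines(s: str) -> str:
--     s = s.replace("\r\n", "\n").replace("\r", "\n")
--     # collapse 3+ blank lines to 2
--     out: List[str] = []
--     blank_run = 0
--     for line in s.split("\n"):
--         if line.strip() == "":
--             blank_run += 1
--             if blank_run <= 2:
--                 out.append("")
--         else:
--             blank_run = 0
--             out.append(line)
--     return "\n".join(out).strip()
-- ===== SOURCE B (Python) =====
-- def _normalize_newlines(s: str) -> str: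
--     s = s.replace("\r\n", "\n").replace("\r", "\n")
--     lines = ["" if ln.strip() == "" else ln for ln in s.split("\n")]
--     out = []
--     i, n = 0, len(lines)
--     while i < n:
--         if lines[i] == "":
--             j = i
--             while j < n and lines[j] == "":
--                 j += 1
--             out.extend([""] * min(j - i, 2))
--             i = j
--         else:
--             out.append(lines[i])
--             i += 1
--     return "\n".join(out).strip()
-- ===== Notes on version B (the rewrite author's own statement) =====
-- stated objective: alternative
-- what changed: B pre-maps whitespace-only lines to empty strings, then collapses each maximal run of blank lines at once with a two-pointer run scan (emit min(run,2) blanks, jump past the run), instead of A's single stateful loop carrying a blank_run counter per line.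
import Mathlib
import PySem

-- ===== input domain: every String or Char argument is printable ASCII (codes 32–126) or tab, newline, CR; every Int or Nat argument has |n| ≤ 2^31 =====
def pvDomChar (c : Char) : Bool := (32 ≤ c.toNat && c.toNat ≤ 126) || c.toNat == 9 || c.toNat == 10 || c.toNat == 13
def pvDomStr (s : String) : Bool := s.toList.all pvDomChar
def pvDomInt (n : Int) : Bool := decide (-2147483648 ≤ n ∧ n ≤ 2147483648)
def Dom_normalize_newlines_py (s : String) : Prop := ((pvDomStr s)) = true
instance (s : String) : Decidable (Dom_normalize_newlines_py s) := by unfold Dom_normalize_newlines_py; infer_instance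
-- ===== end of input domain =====

-- B collapses each maximal run of blank lines in one two-pointer scan instead of A's per-line blank_run counter; alternative decomposition, same cost.

-- ===== PORT A =====
-- one fold over the lines, state = (out, blank_run)
def nnStepA (st : List String × Int) (line : String) : List String × Int :=
  if PySem.Str.strip line == "" then
    if st.2 + 1 ≤ 2 then (st.1 ++ [""], st.2 + 1) else (st.1, st.2 + 1)
  else (st.1 ++ [line], 0)

def normalize_newlines_py (s : String) : String :=
  let s1 := PySem.Str.replace (PySem.Str.replace s "\r\n" "\n") "\r" "\n"
  let r := ((PySem.Str.split? s1 "\n").getD []).foldl nnStepA ([], 0)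
  PySem.Str.strip (PySem.Str.join "\n" r.1)

-- ===== PORT B =====
-- the inner `while j < n and lines[j] == ""` scan of Source B, as takeWhile/dropWhile over the suffix
def nnCollapse : List String → List String
  | [] => []
  | l :: ls =>
    if l == "" then
      List.replicate (min ((l :: ls).takeWhile (· == "")).length 2) "" ++
        nnCollapse (ls.dropWhile (· == ""))
    else
      l :: nnCollapse ls
  termination_by ls => ls.length
  decreasing_by
    · exact Nat.lt_succ_of_le (List.length_dropWhile_le _ _)
    · simp

def normalize_newlines_py_alt (s : String) : String :=
  let s1 := PySem.Str.replace (PySem.Str.replace s "\r\n" "\n") "\r" "\n"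
  let lines := ((PySem.Str.split? s1 "\n").getD []).map
    (fun ln => if PySem.Str.strip ln == "" then "" else ln)
  PySem.Str.strip (PySem.Str.join "\n" (nnCollapse lines))

-- ===== PRECONDITION & SPEC =====
def Spec_normalize_newlines_py (s : String) (out : String) : Prop := out = normalize_newlines_py_alt s
instance (s : String) (out : String) : Decidable (Spec_normalize_newlines_py s out) := by unfold Spec_normalize_newlines_py; infer_instance

-- ===== CLAIM (what is proved, stated in full; the proofs are below) =====
def Claim_equal_normalize_newlines_py : Prop := ∀ (s : String), Dom_normalize_newlines_py s → Spec_normalize_newlines_py s (normalize_newlines_py s)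

-- ===== LEMMAS AND PROOFS =====

-- the blank test and the line-mapping, named for the proofs
def nnQ (x : String) : Bool := PySem.Str.strip x == ""
def nnF (x : String) : String := if PySem.Str.strip x == "" then "" else x

theorem nn_strip_empty : PySem.Str.strip "" = "" := by decide

theorem nn_eq_empty_false {x : String} (h : nnQ x = false) : (x == "") = false := by
  cases hxe : (x == "") with
  | false => rfl
  | true =>
    have hx : x = "" := by simpa using hxe
    subst hx
    rw [nnQ, nn_strip_empty] at h
    simp at h

theorem nn_pred_eq : ((fun x : String => x == "") ∘ nnF) = nnQ := by
  funext x
  simp only [Function.comp, nnF, nnQ]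
  cases h : (PySem.Str.strip x == "") with
  | true => simp
  | false =>
    simp only [Bool.false_eq_true, if_false]
    exact nn_eq_empty_false (x := x) (by rw [nnQ]; exact h)

theorem nn_dropWhile_head {p : String → Bool} :
    ∀ (l : List String) (x : String) (xs : List String),
      l.dropWhile p = x :: xs → p x = false := by
  intro l
  induction l with
  | nil => intro x xs h; simp [List.dropWhile] at h
  | cons a l ih =>
    intro x xs h
    rw [List.dropWhile_cons] at h
    by_cases hp : p a = true
    · rw [if_pos hp] at h; exact ih x xs h
    · rw [if_neg hp] at h
      cases h
      simpa using hp

-- one maximal blank run advances the counter by its length and appends the blanks that fit under 2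
theorem nn_run : ∀ (run : List String), ∀ (rest out : List String) (b : Int), 0 ≤ b →
    (∀ x ∈ run, nnQ x = true) →
    (run ++ rest).foldl nnStepA (out, b) =
      rest.foldl nnStepA
        (out ++ List.replicate (min (b + run.length) 2 - min b 2).toNat "", b + run.length) := by
  intro run
  induction run with
  | nil =>
    intro rest out b hb _
    simp

  | cons x run ih =>
    intro rest out b hb hall
    have hx : nnQ x = true := hall x (List.mem_cons_self)
    have hall' : ∀ y ∈ run, nnQ y = true := fun y hy => hall y (List.mem_cons_of_mem _ hy)
    have hstep : nnStepA (out, b) x =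
        if b + 1 ≤ 2 then (out ++ [""], b + 1) else (out, b + 1) := by
      rw [nnStepA]
      rw [nnQ] at hx
      simp [hx]
    rw [List.cons_append, List.foldl_cons, hstep]
    by_cases h2 : b + 1 ≤ 2
    · rw [if_pos h2, ih rest (out ++ [""]) (b + 1) (by omega) hall']
      have harith : (1 : ℕ) + (min (b + 1 + run.length) 2 - min (b + 1) 2).toNat =
          (min (b + (run.length + 1 : ℕ)) 2 - min b 2).toNat := by
        push_cast; omega
      have hlist : out ++ [""] ++ List.replicate (min (b + 1 + run.length) 2 - min (b + 1) 2).toNat "" =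
          out ++ List.replicate (min (b + (run.length + 1 : ℕ)) 2 - min b 2).toNat "" := by
        rw [List.append_assoc, ← List.replicate_one (a := ("" : String)), ← List.replicate_add, harith]
      have hcnt : b + 1 + (run.length : ℤ) = b + ((run.length + 1 : ℕ) : ℤ) := by push_cast; ring
      rw [hlist, hcnt]
      simp
    · rw [if_neg h2, ih rest out (b + 1) (by omega) hall']
      have harith : (min (b + 1 + run.length) 2 - min (b + 1) 2).toNat =
          (min (b + (run.length + 1 : ℕ)) 2 - min b 2).toNat := by
        push_cast; omega
      have hcnt : b + 1 + (run.length : ℤ) = b + ((run.length + 1 : ℕ) : ℤ) := by push_cast; ring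
      rw [harith, hcnt]
      simp

theorem nn_map_eq : (fun ln : String => if PySem.Str.strip ln == "" then "" else ln) = nnF := by
  funext x; rw [nnF]

theorem nn_main : ∀ (n : ℕ) (ls : List String) (out : List String), ls.length ≤ n →
    (ls.foldl nnStepA (out, 0)).1 =
      out ++ nnCollapse (ls.map (fun ln => if PySem.Str.strip ln == "" then "" else ln)) := by
  intro n
  induction n with
  | zero =>
    intro ls out h
    have : ls = [] := List.eq_nil_of_length_eq_zero (Nat.le_zero.mp h)
    subst this
    simp [nnCollapse]
  | succ n ih =>
    intro ls out h
    rw [nn_map_eq]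
    match ls with
    | [] => simp [nnCollapse]
    | l :: ls' =>
      by_cases hb : nnQ l = true
      · -- blank head: the whole maximal blank run is consumed at once on both sides
        have hf : nnF l = "" := by rw [nnF]; rw [nnQ] at hb; simp [hb]
        have hsplit : l :: ls' = (l :: ls').takeWhile nnQ ++ (l :: ls').dropWhile nnQ :=
          (List.takeWhile_append_dropWhile).symm
        have htw : (l :: ls').takeWhile nnQ = l :: ls'.takeWhile nnQ := by
          rw [List.takeWhile_cons, if_pos hb]
        have hdw : (l :: ls').dropWhile nnQ = ls'.dropWhile nnQ := by
          rw [List.dropWhile_cons, if_pos hb]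
        have hmtw : (ls'.map nnF).takeWhile (· == "") = (ls'.takeWhile nnQ).map nnF := by
          rw [List.takeWhile_map, nn_pred_eq]
        have hmdw : (ls'.map nnF).dropWhile (· == "") = (ls'.dropWhile nnQ).map nnF := by
          rw [List.dropWhile_map, nn_pred_eq]
        have hcol : nnCollapse ((l :: ls').map nnF) =
            List.replicate (min ((l :: ls').takeWhile nnQ).length 2) "" ++
              nnCollapse (((l :: ls').dropWhile nnQ).map nnF) := by
          rw [List.map_cons, hf, nnCollapse]
          rw [if_pos (by simp)]
          rw [List.takeWhile_cons, if_pos (by simp), hmtw, hmdw, htw, hdw]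
          simp
        conv_lhs => rw [hsplit]
        rw [nn_run _ _ _ 0 le_rfl (fun x hx => List.mem_takeWhile_imp hx), hcol, htw, hdw]
        simp only [zero_add]
        have hcount : ((min (((l :: ls'.takeWhile nnQ).length : ℤ)) 2 - min 0 2)).toNat =
            min (l :: ls'.takeWhile nnQ).length 2 := by omega
        rw [hcount]
        generalize hout' : out ++ List.replicate (min (l :: ls'.takeWhile nnQ).length 2) "" = out'
        rcases hrest : ls'.dropWhile nnQ with _ | ⟨r, rs⟩
        · simp only [List.foldl_nil, List.map_nil]
          have hnil : nnCollapse [] = [] := by simp [nnCollapse]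
          rw [hnil, List.append_nil, ← hout']
        · have hr : nnQ r = false := nn_dropWhile_head ls' r rs hrest
          have hfr : nnF r = r := by rw [nnF]; rw [nnQ] at hr; simp [hr]
          have hstep : nnStepA (out', ((l :: ls'.takeWhile nnQ).length : ℤ)) r = (out' ++ [r], 0) := by
            rw [nnStepA]; rw [nnQ] at hr; simp [hr]
          have hlen : rs.length ≤ n := by
            have h1 := List.length_dropWhile_le (p := nnQ) ls'
            rw [hrest] at h1
            simp at h h1 ⊢
            omega
          rw [List.foldl_cons, hstep, ih rs (out' ++ [r]) hlen, nn_map_eq]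
          have hcr : nnCollapse (r :: rs.map nnF) = r :: nnCollapse (rs.map nnF) := by
            rw [nnCollapse, if_neg (by simpa using nn_eq_empty_false hr)]
          simp [List.map_cons, hfr, hcr, ← hout']
      · -- non-blank head
        have hbf : nnQ l = false := by simpa using hb
        have hf : nnF l = l := by rw [nnF]; rw [nnQ] at hbf; simp [hbf]
        have hstep : nnStepA (out, 0) l = (out ++ [l], 0) := by
          rw [nnStepA]; rw [nnQ] at hbf; simp [hbf]
        have hlen : ls'.length ≤ n := by simpa using h
        rw [List.foldl_cons, hstep, ih ls' (out ++ [l]) hlen, nn_map_eq]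
        have hcl : nnCollapse (l :: ls'.map nnF) = l :: nnCollapse (ls'.map nnF) := by
          rw [nnCollapse, if_neg (by simpa using nn_eq_empty_false hbf)]
        simp [List.map_cons, hf, hcl]

-- ===== VERDICT (by name: the statement is the Claim_ definition above) =====
theorem normalize_newlines_py_spec : Claim_equal_normalize_newlines_py := by
  intro s _
  unfold Spec_normalize_newlines_py normalize_newlines_py normalize_newlines_py_alt
  simp only [nn_main _ _ [] le_rfl, List.nil_append]
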